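-- pv_equiv track=rewrite | github.com/pypi-data/pypi-mirror-404 | packages/deepresearch-flow/deepresearch_flow-0.6.1-py3-none-any.whl/deepresearch_flow/recognize/math.py | _collapse_spaced_text
-- ===== SOURCE A (Python) =====
-- def _collapse_spaced_text(text: str) -> str:
--     tokens = text.split()
--     if not tokens:
--         return text
--     out: list[str] = []
--     i = 0
--     while i < len(tokens):
--         if len(tokens[i]) == 1:
--             j = i
--             while j < len(tokens) and len(tokens[j]) == 1:
--                 j += 1
--             out.append("".join(tokens[i:j]))
--             i = j
--         else:
--             out.append(tokens[i])
--             i += 1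
--     return " ".join(out)
-- ===== SOURCE B (Python) =====
-- def _collapse_spaced_text(text: str) -> str:
--     tokens = text.split()
--     if not tokens:
--         return text
--     norm = " ".join(tokens)
--     n = len(norm)
--     kept = []
--     for k, c in enumerate(norm):
--         if (
--             c == " "
--             and (k == 1 or norm[k - 2] == " ")
--             and (k + 2 == n or norm[k + 2] == " ")
--         ):
--             continue
--         kept.append(c)
--     return "".join(kept)
-- ===== Notes on version B (the rewrite author's own statement) =====
-- stated objective: alternative
-- what changed: Instead of scanning the token list for maximal runs of single-char tokens, B normalizes the text to a single-space join of its split tokens and then makes a purely local per-character decision: a space is deleted exactly when the characters two positions away on each side (or the string boundaries) show that both adjacent tokens are single characters; no run detection or grouping remains.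
import Mathlib
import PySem

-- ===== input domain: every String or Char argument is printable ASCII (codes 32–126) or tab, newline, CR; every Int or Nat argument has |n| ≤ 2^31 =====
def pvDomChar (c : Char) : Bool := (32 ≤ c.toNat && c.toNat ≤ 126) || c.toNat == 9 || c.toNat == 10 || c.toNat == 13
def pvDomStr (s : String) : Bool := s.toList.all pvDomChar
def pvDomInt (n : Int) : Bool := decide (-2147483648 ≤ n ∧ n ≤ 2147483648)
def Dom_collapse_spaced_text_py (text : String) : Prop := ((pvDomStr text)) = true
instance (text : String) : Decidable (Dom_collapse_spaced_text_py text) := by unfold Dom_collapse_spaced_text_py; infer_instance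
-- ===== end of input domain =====

-- B replaces A's token-level scan for maximal runs of single-char tokens by a purely local
-- per-character rule on the normalized string ' '.join(text.split()): a space is deleted exactly
-- when both neighbouring tokens are single characters, read off from the chars two positions away
-- (objective: alternative); same return value on every input.
-- Loops are ported with a structural fuel argument that is always sufficient (fuel ≥ steps
-- remaining), a totality device only: it never changes the computed value.

-- ===== PORT A =====
-- inner 'while j < len(tokens) and len(tokens[j]) == 1: j += 1'
def pvInnerA (tokens : List String) : Nat → Nat → Nat
  | j, 0 => j
  | j, fuel + 1 =>
    if j < tokens.length then
      if PySem.Str.len (tokens.getD j "") = 1 then pvInnerA tokens (j + 1) fuel else j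
    else j

-- outer 'while i < len(tokens): …'
def pvOuterA (tokens : List String) : Nat → List String → Nat → List String
  | _, out, 0 => out
  | i, out, fuel + 1 =>
    if i < tokens.length then
      if PySem.Str.len (tokens.getD i "") = 1 then
        let j := pvInnerA tokens i (tokens.length - i)
        pvOuterA tokens j (out ++ [PySem.Str.join "" (PySem.List.slice tokens (some (i : Int)) (some (j : Int)))]) fuel
      else
        pvOuterA tokens (i + 1) (out ++ [tokens.getD i ""]) fuel
    else out

def collapse_spaced_text_py (text : String) : String :=
  let tokens := PySem.Str.split₀ text
  if tokens = [] then text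
  else PySem.Str.join " " (pvOuterA tokens 0 [] tokens.length)

-- ===== PORT B =====
-- the per-character decision: 'if c == " " and (k == 1 or norm[k-2] == " ") and (k+2 == n or norm[k+2] == " "): continue'
-- (the Python short-circuit guards k-2 ≥ 0 and k+2 ≤ n; the Lean getD defaults are never the
-- deciding value on those guarded branches, so the Bool is the same)
def pvKeepB (norm : List Char) (n k : Nat) (c : Char) : Bool :=
  !(c == ' ' && (k == 1 || norm.getD (k - 2) ' ' == ' ') && (k + 2 == n || norm.getD (k + 2) ' ' == ' '))

-- 'for k, c in enumerate(norm): … kept.append(c)'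
def pvScanB (norm : List Char) (n : Nat) : Nat → List Char → List Char
  | _, [] => []
  | k, c :: rest =>
    if pvKeepB norm n k c then c :: pvScanB norm n (k + 1) rest
    else pvScanB norm n (k + 1) rest

def collapse_spaced_text_py_alt (text : String) : String :=
  let tokens := PySem.Str.split₀ text
  if tokens = [] then text
  else
    let norm := (PySem.Str.join " " tokens).toList
    String.ofList (pvScanB norm norm.length 0 norm)

-- ===== PRECONDITION & SPEC =====
def Spec_collapse_spaced_text_py (text : String) (out : String) : Prop := out = collapse_spaced_text_py_alt text
instance (text : String) (out : String) : Decidable (Spec_collapse_spaced_text_py text out) := by unfold Spec_collapse_spaced_text_py; infer_instance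

-- ===== CLAIM (what is proved, stated in full; the proofs are below) =====
def Claim_equal_collapse_spaced_text_py : Prop := ∀ (text : String), Dom_collapse_spaced_text_py text → Spec_collapse_spaced_text_py text (collapse_spaced_text_py text)

-- ===== LEMMAS AND PROOFS =====

-- proof-side intermediate: A's output token list, one maximal run at a time (groupby-style)
def pvGroupsB : List String → Nat → List String
  | _, 0 => []
  | [], _ + 1 => []
  | t :: rest, fuel + 1 =>
    if PySem.Str.len t = 1 then
      PySem.Str.join "" (t :: rest.takeWhile (fun s => PySem.Str.len s == 1)) ::
        pvGroupsB (rest.dropWhile (fun s => PySem.Str.len s == 1)) fuel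
    else
      (t :: rest.takeWhile (fun s => !(PySem.Str.len s == 1))) ++
        pvGroupsB (rest.dropWhile (fun s => !(PySem.Str.len s == 1))) fuel

-- proof-side intermediate: pairwise-separator view — between consecutive tokens the separator is
-- '' when both are single-char, ' ' otherwise
def pvPairGo : String → List String → List Char
  | _, [] => []
  | prev, v :: rest =>
    (if PySem.Str.len prev = 1 ∧ PySem.Str.len v = 1 then [] else [' ']) ++ v.toList ++ pvPairGo v rest

def pvPair : List String → List Char
  | [] => []
  | u :: rest => u.toList ++ pvPairGo u rest

theorem pvTakeTW (p : String → Bool) : ∀ l : List String, l.take (l.takeWhile p).length = l.takeWhile p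
  | [] => rfl
  | x :: r => by
    cases hx : p x <;> simp [hx, pvTakeTW p r]

theorem pvDropTW (p : String → Bool) : ∀ l : List String, l.drop (l.takeWhile p).length = l.dropWhile p
  | [] => rfl
  | x :: r => by
    cases hx : p x <;> simp [hx, pvDropTW p r]

theorem pvInnerA_eq (tokens : List String) (fuel : Nat) :
    ∀ j : Nat, tokens.length - j ≤ fuel →
      pvInnerA tokens j fuel = j + ((tokens.drop j).takeWhile (fun s => PySem.Str.len s == 1)).length := by
  induction fuel with
  | zero =>
    intro j hf
    rw [pvInnerA, List.drop_eq_nil_of_le (by omega)]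
    simp
  | succ fuel ih =>
    intro j hf
    rw [pvInnerA]
    by_cases hj : j < tokens.length
    · have hg : tokens.getD j "" = tokens[j] := List.getD_eq_getElem tokens "" hj
      rw [List.drop_eq_getElem_cons hj]
      by_cases h1 : PySem.Str.len (tokens.getD j "") = 1
      · have hp : (PySem.Str.len tokens[j] == 1) = true := by
          simp only [beq_iff_eq]; rw [← hg]; exact h1
        rw [if_pos hj, if_pos h1, ih (j + 1) (by omega), List.takeWhile_cons, hp]
        simp
        omega
      · have hp : (PySem.Str.len tokens[j] == 1) = false := by
          simp only [beq_eq_false_iff_ne, ne_eq]; rw [← hg]; exact h1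
        rw [if_pos hj, if_neg h1, List.takeWhile_cons, hp]
        simp
    · rw [if_neg hj, List.drop_eq_nil_of_le (by omega)]
      simp

theorem pvGroupsB_fuel (fuel fuel' : Nat) :
    ∀ l : List String, l.length ≤ fuel → l.length ≤ fuel' → pvGroupsB l fuel = pvGroupsB l fuel' := by
  induction fuel generalizing fuel' with
  | zero =>
    intro l hf _
    have : l = [] := List.eq_nil_of_length_eq_zero (by omega)
    cases fuel' <;> simp [this, pvGroupsB]
  | succ fuel ih =>
    intro l hf hf'
    match l, fuel' with
    | [], 0 => rfl
    | [], fuel' + 1 => rfl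
    | t :: rest, 0 => simp at hf'
    | t :: rest, fuel' + 1 =>
      rw [pvGroupsB, pvGroupsB]
      have hd1 := List.length_dropWhile_le (fun s => PySem.Str.len s == 1) rest
      have hd2 := List.length_dropWhile_le (fun s => !(PySem.Str.len s == 1)) rest
      simp only [List.length_cons] at hf hf'
      by_cases h1 : PySem.Str.len t = 1
      · rw [if_pos h1, if_pos h1,
          ih fuel' (rest.dropWhile (fun s => PySem.Str.len s == 1)) (by omega) (by omega)]
      · rw [if_neg h1, if_neg h1,
          ih fuel' (rest.dropWhile (fun s => !(PySem.Str.len s == 1))) (by omega) (by omega)]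

theorem pvGroupsB_false (l : List String) (fuel : Nat) (hf : l.length ≤ fuel) :
    l.takeWhile (fun s => !(PySem.Str.len s == 1)) ++ pvGroupsB (l.dropWhile (fun s => !(PySem.Str.len s == 1))) fuel = pvGroupsB l (fuel + 1) := by
  match l with
  | [] => cases fuel <;> rfl
  | x :: r =>
    by_cases hx : PySem.Str.len x = 1
    · have hq : (!(PySem.Str.len x == 1)) = false := by
        simp only [Bool.not_eq_false', beq_iff_eq]; exact hx
      rw [List.takeWhile_cons, List.dropWhile_cons, hq]
      simp only [Bool.false_eq_true, if_false, List.nil_append]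
      exact pvGroupsB_fuel fuel (fuel + 1) (x :: r) hf (by omega)
    · have hq : (!(PySem.Str.len x == 1)) = true := by
        simp only [Bool.not_eq_true', beq_eq_false_iff_ne, ne_eq]; exact hx
      rw [List.takeWhile_cons, List.dropWhile_cons, hq]
      rw [pvGroupsB, if_neg hx]
      have hd2 := List.length_dropWhile_le (fun s => !(PySem.Str.len s == 1)) r
      rw [pvGroupsB_fuel fuel fuel (r.dropWhile _) (by simp at hf; omega) (by simp at hf; omega)]
      simp

theorem pvOuterA_eq (tokens : List String) (fuel : Nat) :
    ∀ (i : Nat) (out : List String), tokens.length - i ≤ fuel →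
      pvOuterA tokens i out fuel = out ++ pvGroupsB (tokens.drop i) (tokens.drop i).length := by
  induction fuel with
  | zero =>
    intro i out hf
    rw [pvOuterA, List.drop_eq_nil_of_le (by omega)]
    simp [pvGroupsB]
  | succ fuel ih =>
    intro i out hf
    rw [pvOuterA]
    by_cases hi : i < tokens.length
    · have hg : tokens.getD i "" = tokens[i] := List.getD_eq_getElem tokens "" hi
      have hd : tokens.drop i = tokens[i] :: tokens.drop (i + 1) := List.drop_eq_getElem_cons hi
      by_cases h1 : PySem.Str.len (tokens.getD i "") = 1
      · have h1g : PySem.Str.len tokens[i] = 1 := by rw [← hg]; exact h1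
        have hp : (PySem.Str.len tokens[i] == 1) = true := by
          simp only [beq_iff_eq]; exact h1g
        have hk := pvInnerA_eq tokens (tokens.length - i) i (by omega)
        have htw : (tokens.drop i).takeWhile (fun s => PySem.Str.len s == 1)
            = tokens[i] :: (tokens.drop (i + 1)).takeWhile (fun s => PySem.Str.len s == 1) := by
          rw [hd, List.takeWhile_cons, hp]
          simp
        have hlen1 : (tokens.drop (i + 1)).length = tokens.length - (i + 1) := by simp
        have hj : pvInnerA tokens i (tokens.length - i)
            = i + (1 + ((tokens.drop (i + 1)).takeWhile (fun s => PySem.Str.len s == 1)).length) := by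
          rw [hk, htw]; simp; omega
        rw [if_pos hi, if_pos h1, ih (pvInnerA tokens i (tokens.length - i)) _ (by omega)]
        have hslice : PySem.List.slice tokens (some (i : Int)) (some ((pvInnerA tokens i (tokens.length - i) : Nat) : Int))
            = (tokens.drop i).takeWhile (fun s => PySem.Str.len s == 1) := by
          rw [PySem.List.slice_natCast, hj]
          have hlen : i + (1 + ((tokens.drop (i + 1)).takeWhile (fun s => PySem.Str.len s == 1)).length) - i
              = ((tokens.drop i).takeWhile (fun s => PySem.Str.len s == 1)).length := by
            rw [htw]; simp; omega
          rw [hlen, pvTakeTW]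
        have hdrop : tokens.drop (pvInnerA tokens i (tokens.length - i))
            = (tokens.drop (i + 1)).dropWhile (fun s => PySem.Str.len s == 1) := by
          rw [← pvDropTW (fun s => PySem.Str.len s == 1) (tokens.drop (i + 1))]
          rw [List.drop_drop]
          congr 1
          omega
        rw [hslice, hdrop, htw]
        have hdl : (tokens[i] :: tokens.drop (i + 1)).length = (tokens.drop (i + 1)).length + 1 := rfl
        conv_rhs => rw [hd, hdl, pvGroupsB, if_pos h1g]
        have hdw := List.length_dropWhile_le (fun s => PySem.Str.len s == 1) (tokens.drop (i + 1))
        rw [pvGroupsB_fuel ((tokens.drop (i + 1)).dropWhile (fun s => PySem.Str.len s == 1)).length (tokens.drop (i + 1)).length _ (by omega) (by omega)]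
        simp
      · have h1g : ¬ PySem.Str.len tokens[i] = 1 := by rw [← hg]; exact h1
        rw [if_pos hi, if_neg h1, ih (i + 1) _ (by omega)]
        have hdl : (tokens[i] :: tokens.drop (i + 1)).length = (tokens.drop (i + 1)).length + 1 := rfl
        conv_rhs => rw [hd, hdl, pvGroupsB, if_neg h1g]
        rw [List.cons_append, pvGroupsB_false (tokens.drop (i + 1)) (tokens.drop (i + 1)).length (by omega)]
        rw [pvGroupsB_fuel ((tokens.drop (i + 1)).length + 1) (tokens.drop (i + 1)).length (tokens.drop (i + 1)) (by omega) (by omega)]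
        rw [hg]
        simp
    · rw [if_neg hi, List.drop_eq_nil_of_le (by omega)]
      simp [pvGroupsB]

-- ----- step 2: join " " (pvGroupsB ts) = pvPair ts (token-level) -----

-- ' '-join of a nonempty token list, as char lists
theorem pvJoinChars : ∀ (x : String) (xs : List String),
    (PySem.Str.join " " (x :: xs)).toList = x.toList ++ xs.flatMap (fun w => ' ' :: w.toList) := by
  intro x xs
  induction xs generalizing x with
  | nil =>
    simp only [PySem.Str.join, String.toList_ofList, List.map_cons, List.map_nil,
      PySem.Chars.join_singleton, List.flatMap_nil, List.append_nil]
  | cons y ys ih =>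
    have h := ih y
    simp only [PySem.Str.join, String.toList_ofList, List.map_cons] at h ⊢
    rw [PySem.Chars.join_cons_cons, h]
    simp [List.flatMap_cons]

theorem pvPairGo_singles : ∀ (r : List String) (prev : String) (rest2 : List String),
    (∀ x ∈ r, PySem.Str.len x = 1) → PySem.Str.len prev = 1 →
    pvPairGo prev (r ++ rest2) = r.flatMap String.toList ++ pvPairGo (r.getLastD prev) rest2 := by
  intro r
  induction r with
  | nil => intro prev rest2 _ _; simp
  | cons x r' ih =>
    intro prev rest2 hall hprev
    have hx : PySem.Str.len x = 1 := hall x (by simp)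
    simp only [List.cons_append, pvPairGo, List.getLastD_cons]
    rw [if_pos (And.intro hprev hx), ih x rest2 (fun y hy => hall y (by simp [hy])) hx]
    simp

theorem pvPairGo_nonsingles : ∀ (ws : List String) (prev : String) (rest2 : List String),
    (∀ w ∈ ws, ¬ PySem.Str.len w = 1) →
    pvPairGo prev (ws ++ rest2) = ws.flatMap (fun w => ' ' :: w.toList) ++ pvPairGo (ws.getLastD prev) rest2 := by
  intro ws
  induction ws with
  | nil => intro prev rest2 _; simp
  | cons x ws' ih =>
    intro prev rest2 hall
    have hx : ¬ PySem.Str.len x = 1 := hall x (by simp)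
    simp only [List.cons_append, pvPairGo, List.getLastD_cons]
    rw [if_neg (by tauto), ih x rest2 (fun y hy => hall y (by simp [hy]))]
    simp

theorem pvJoin0 : ∀ (x : String) (xs : List String),
    (PySem.Str.join "" (x :: xs)).toList = x.toList ++ xs.flatMap String.toList := by
  intro x xs
  induction xs generalizing x with
  | nil =>
    simp only [PySem.Str.join, String.toList_ofList, List.map_cons, List.map_nil,
      PySem.Chars.join_singleton, List.flatMap_nil, List.append_nil]
  | cons y ys ih =>
    have h := ih y
    simp only [PySem.Str.join, String.toList_ofList, List.map_cons] at h ⊢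
    rw [PySem.Chars.join_cons_cons, h]
    simp [List.flatMap_cons]

theorem pvGroupsB_nil : ∀ f, pvGroupsB [] f = [] := by
  intro f; cases f <;> rfl

theorem pvGroupsB_ne : ∀ (f : Nat) (l : List String), l ≠ [] → pvGroupsB l (f + 1) ≠ [] := by
  intro f l hl
  match l with
  | t :: rest =>
    rw [pvGroupsB]
    by_cases h1 : PySem.Str.len t = 1
    · rw [if_pos h1]; simp
    · rw [if_neg h1]; simp

theorem pvDropHead (p : String → Bool) (l : List String) (d : String) (dr : List String)
    (h : l.dropWhile p = d :: dr) : p d = false := by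
  have h2 : (l.dropWhile p).head (by simp [h]) = d := by simp [h]
  have := List.head_dropWhile_not (p := p) (l := l) (w := by simp [h])
  rw [h2] at this
  simpa using this

theorem pvGroups_pair : ∀ (fuel : Nat) (ts : List String), ts.length ≤ fuel → ts ≠ [] →
    (PySem.Str.join " " (pvGroupsB ts fuel)).toList = pvPair ts := by
  intro fuel
  induction fuel with
  | zero =>
    intro ts hlen hne
    exact absurd (List.eq_nil_of_length_eq_zero (by omega)) hne
  | succ fuel ih =>
    intro ts hlen hne
    match ts with
    | t :: rest =>
    simp only [List.length_cons] at hlen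
    rw [pvGroupsB]
    by_cases h1 : PySem.Str.len t = 1
    · rw [if_pos h1]
      have htwall : ∀ x ∈ rest.takeWhile (fun s => PySem.Str.len s == 1), PySem.Str.len x = 1 := by
        intro x hx
        simpa using List.mem_takeWhile_imp hx
      have hg := pvJoin0 t (rest.takeWhile (fun s => PySem.Str.len s == 1))
      have hdwlen : (rest.dropWhile (fun s => PySem.Str.len s == 1)).length ≤ fuel := by
        have := List.length_dropWhile_le (fun s => PySem.Str.len s == 1) rest
        omega
      have hrest : rest.takeWhile (fun s => PySem.Str.len s == 1) ++ rest.dropWhile (fun s => PySem.Str.len s == 1) = rest := List.takeWhile_append_dropWhile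
      cases hdweq : rest.dropWhile (fun s => PySem.Str.len s == 1) with
      | nil =>
        rw [hdweq] at hrest hdwlen
        rw [pvGroupsB_nil, pvJoinChars]
        have hrest' : rest = rest.takeWhile (fun s => PySem.Str.len s == 1) := by
          simpa using hrest.symm
        simp only [List.flatMap_nil, List.append_nil, hg]
        rw [pvPair]
        conv_rhs => rw [hrest']
        have hsing := pvPairGo_singles (rest.takeWhile (fun s => PySem.Str.len s == 1)) t [] htwall h1
        rw [List.append_nil] at hsing
        rw [hsing]
        simp [pvPairGo]
      | cons d dr =>
        rw [hdweq] at hrest hdwlen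
        have hgne : pvGroupsB (d :: dr) fuel ≠ [] := by
          match fuel, hdwlen with
          | f + 1, _ => exact pvGroupsB_ne f (d :: dr) (by simp)
        match hgs : pvGroupsB (d :: dr) fuel with
        | [] => exact absurd hgs hgne
        | g' :: gs' =>
          have hIH : (PySem.Str.join " " (g' :: gs')).toList = pvPair (d :: dr) := by
            rw [← hgs]
            exact ih (d :: dr) hdwlen (by simp)
          rw [pvJoinChars]
          rw [pvJoinChars] at hIH
          have hd1 : PySem.Str.len d ≠ 1 := by
            simpa using pvDropHead (fun s => PySem.Str.len s == 1) rest d dr hdweq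
          rw [pvPair]
          conv_rhs => rw [← hrest]
          rw [pvPairGo_singles _ t (d :: dr) htwall h1]
          have hq1 : PySem.Str.len ((rest.takeWhile (fun s => PySem.Str.len s == 1)).getLastD t) = 1 := by
            rcases List.mem_cons.mp (List.getLastD_mem_cons (l := rest.takeWhile (fun s => PySem.Str.len s == 1)) (a := t)) with hql | hql
            · rw [hql]; exact h1
            · exact htwall _ hql
          rw [pvPairGo, if_neg (by tauto)]
          have hIH' : g'.toList ++ List.flatMap (fun w => ' ' :: w.toList) gs' = d.toList ++ pvPairGo d dr := by
            simpa [pvPair] using hIH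
          simp only [hg, List.flatMap_cons, List.append_assoc, List.cons_append]
          rw [hIH']
          simp
    · rw [if_neg h1]
      have htwall : ∀ x ∈ rest.takeWhile (fun s => !(PySem.Str.len s == 1)), ¬ PySem.Str.len x = 1 := by
        intro x hx
        simpa using List.mem_takeWhile_imp hx
      have hdwlen : (rest.dropWhile (fun s => !(PySem.Str.len s == 1))).length ≤ fuel := by
        have := List.length_dropWhile_le (fun s => !(PySem.Str.len s == 1)) rest
        omega
      have hrest : rest.takeWhile (fun s => !(PySem.Str.len s == 1)) ++ rest.dropWhile (fun s => !(PySem.Str.len s == 1)) = rest := List.takeWhile_append_dropWhile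
      cases hdweq : rest.dropWhile (fun s => !(PySem.Str.len s == 1)) with
      | nil =>
        rw [hdweq] at hrest hdwlen
        have hrest' : rest = rest.takeWhile (fun s => !(PySem.Str.len s == 1)) := by
          simpa using hrest.symm
        rw [pvGroupsB_nil, List.append_nil, pvJoinChars, pvPair]
        conv_rhs => rw [hrest']
        have hns := pvPairGo_nonsingles (rest.takeWhile (fun s => !(PySem.Str.len s == 1))) t [] htwall
        rw [List.append_nil] at hns
        rw [hns]
        simp [pvPairGo]
      | cons d dr =>
        rw [hdweq] at hrest hdwlen
        have hgne : pvGroupsB (d :: dr) fuel ≠ [] := by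
          match fuel, hdwlen with
          | f + 1, _ => exact pvGroupsB_ne f (d :: dr) (by simp)
        match hgs : pvGroupsB (d :: dr) fuel with
        | [] => exact absurd hgs hgne
        | g' :: gs' =>
          have hIH : (PySem.Str.join " " (g' :: gs')).toList = pvPair (d :: dr) := by
            rw [← hgs]
            exact ih (d :: dr) hdwlen (by simp)
          rw [List.cons_append, pvJoinChars]
          rw [pvJoinChars] at hIH
          rw [pvPair]
          conv_rhs => rw [← hrest]
          rw [pvPairGo_nonsingles _ t (d :: dr) htwall]
          have hq1 : ¬ PySem.Str.len ((rest.takeWhile (fun s => !(PySem.Str.len s == 1))).getLastD t) = 1 := by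
            rcases List.mem_cons.mp (List.getLastD_mem_cons (l := rest.takeWhile (fun s => !(PySem.Str.len s == 1))) (a := t)) with hql | hql
            · rw [hql]; exact h1
            · exact htwall _ hql
          rw [pvPairGo, if_neg (by tauto)]
          have hIH' : g'.toList ++ List.flatMap (fun w => ' ' :: w.toList) gs' = d.toList ++ pvPairGo d dr := by
            simpa [pvPair] using hIH
          rw [List.flatMap_append, List.flatMap_cons]
          simp only [List.append_assoc, List.cons_append]
          rw [hIH']
          simp

-- ----- step 3: the char-level scan computes pvPair -----

theorem pvScanB_token : ∀ (u : List Char) (norm : List Char) (n k : Nat) (rest : List Char),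
    (∀ c ∈ u, c ≠ ' ') →
    pvScanB norm n k (u ++ rest) = u ++ pvScanB norm n (k + u.length) rest := by
  intro u
  induction u with
  | nil => intro norm n k rest _; simp
  | cons c u' ih =>
    intro norm n k rest hall
    have hc : c ≠ ' ' := hall c (by simp)
    have hkeep : pvKeepB norm n k c = true := by
      simp [pvKeepB, hc]
    simp only [List.cons_append, pvScanB, hkeep, if_pos]
    rw [ih norm n (k + 1) rest (fun d hd => hall d (by simp [hd]))]
    have harith : k + 1 + u'.length = k + (u'.length + 1) := by omega
    simp [harith]

theorem pvGetDflt (l : List Char) (i : Nat) (h : l.getD i 'x' = ' ') : l.getD i ' ' = ' ' := by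
  rcases hh : l[i]? with _ | c
  · rw [List.getD, hh] at h
    simp at h
  · rw [List.getD, hh] at h ⊢
    simpa using h

theorem pvScan_pair : ∀ (ts : List String) (norm : List Char) (k : Nat),
    ts ≠ [] → (∀ u ∈ ts, u.toList ≠ [] ∧ ∀ c ∈ u.toList, c ≠ ' ') →
    norm.drop k = (PySem.Str.join " " ts).toList →
    (k = 0 ∨ norm.getD (k - 1) 'x' = ' ') →
    pvScanB norm norm.length k (norm.drop k) = pvPair ts := by
  intro ts
  induction ts with
  | nil => intro norm k h; exact absurd rfl h
  | cons u vs ih =>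
    intro norm k _ htok hdrop hctx
    have hu := htok u (by simp)
    match vs with
    | [] =>
      rw [pvJoinChars, List.flatMap_nil, List.append_nil] at hdrop
      have hstep := pvScanB_token u.toList norm norm.length k [] hu.2
      rw [List.append_nil] at hstep
      rw [hdrop, hstep, pvScanB]
      simp [pvPair, pvPairGo]
    | v :: rest =>
      have hv := htok v (by simp)
      -- norm.drop k = u.toList ++ ' ' :: T  with  T = (join " " (v::rest)).toList
      have hT : (PySem.Str.join " " (v :: rest)).toList = v.toList ++ rest.flatMap (fun w => ' ' :: w.toList) :=
        pvJoinChars v rest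
      have hdrop' : norm.drop k = u.toList ++ ' ' :: (PySem.Str.join " " (v :: rest)).toList := by
        rw [hdrop, pvJoinChars, hT]
        simp [List.flatMap_cons]
      have hne : norm.drop k ≠ [] := by
        rw [hdrop']
        intro hcontra
        exact hu.1 (by simpa using (List.append_eq_nil_iff.mp hcontra).1)
      have hklt : k < norm.length := by
        by_contra hge
        exact hne (List.drop_eq_nil_of_le (by omega))
      have hm : norm.length = k + u.toList.length + 1 + (PySem.Str.join " " (v :: rest)).toList.length := by
        have h' := congrArg List.length hdrop'
        rw [List.length_drop, List.length_append, List.length_cons] at h'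
        omega
      have hdrop2 : norm.drop k = (u.toList ++ [' ']) ++ (PySem.Str.join " " (v :: rest)).toList := by
        rw [hdrop']; simp
      have hget : ∀ (i : Nat) (d : Char), norm.getD (k + i) d = ((u.toList ++ [' ']) ++ (PySem.Str.join " " (v :: rest)).toList).getD i d := by
        intro i d
        rw [← hdrop2]
        simp [List.getD, List.getElem?_drop]
      -- the left test at the space position k + |u|
      have hl : ((k + u.toList.length == 1) || (norm.getD (k + u.toList.length - 2) ' ' == ' ')) = decide (u.toList.length = 1) := by
        by_cases h1 : u.toList.length = 1
        · rcases hctx with hk0 | hsp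
          · subst hk0
            rw [h1]
            simp
          · rw [show k + u.toList.length - 2 = k - 1 from by omega, pvGetDflt norm (k - 1) hsp, h1]
            simp
        · have h2 : 2 ≤ u.toList.length := by
            have h0 : u.toList.length ≠ 0 := by
              intro h0; exact hu.1 (List.eq_nil_of_length_eq_zero h0)
            omega
          have hgd : norm.getD (k + u.toList.length - 2) ' ' = u.toList.getD (u.toList.length - 2) ' ' := by
            rw [show k + u.toList.length - 2 = k + (u.toList.length - 2) from by omega, hget]
            have e1 : ((u.toList ++ [' ']) ++ (PySem.Str.join " " (v :: rest)).toList)[u.toList.length - 2]?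
                = u.toList[u.toList.length - 2]? := by
              rw [List.getElem?_append_left (by simp only [List.length_append, List.length_cons, List.length_nil]; omega), List.getElem?_append_left (by omega)]
            rw [List.getD_eq_getElem?_getD, e1, ← List.getD_eq_getElem?_getD]
          have hmem : u.toList.getD (u.toList.length - 2) ' ' ∈ u.toList := by
            rw [List.getD_eq_getElem u.toList ' ' (by omega)]
            exact List.getElem_mem _
          have hne' : u.toList.getD (u.toList.length - 2) ' ' ≠ ' ' := hu.2 _ hmem
          have e2 : (k + u.toList.length == 1) = false := by
            simp only [beq_eq_false_iff_ne, ne_eq]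
            omega
          have e3 : (norm.getD (k + u.toList.length - 2) ' ' == ' ') = false := by
            rw [hgd]
            exact beq_eq_false_iff_ne.mpr hne'
          rw [e2, e3, Bool.false_or]
          exact (decide_eq_false h1).symm
      -- the right test at the space position k + |u|
      have hr : ((k + u.toList.length + 2 == norm.length) || (norm.getD (k + u.toList.length + 2) ' ' == ' ')) = decide (v.toList.length = 1) := by
        by_cases h1 : v.toList.length = 1
        · cases hR : rest with
          | nil =>
            have hTlen1 : (PySem.Str.join " " (v :: rest)).toList.length = 1 := by
              rw [hT, hR]
              simp [h1]
            have hmeq : (k + u.toList.length + 2 == norm.length) = true := by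
              simp only [beq_iff_eq]
              omega
            rw [hmeq, Bool.true_or]
            exact (decide_eq_true h1).symm
          | cons w rest' =>
            have e1 : ((u.toList ++ [' ']) ++ (PySem.Str.join " " (v :: rest)).toList)[u.toList.length + 2]?
                = (PySem.Str.join " " (v :: rest)).toList[1]? := by
              rw [List.getElem?_append_right (by simp)]
              congr 1
              simp only [List.length_append, List.length_cons, List.length_nil]
              omega
            have e2 : (PySem.Str.join " " (v :: rest)).toList[1]? = some ' ' := by
              rw [hT, hR, List.getElem?_append_right (by omega), h1]
              simp [List.flatMap_cons]
            have hgd : norm.getD (k + u.toList.length + 2) ' ' = ' ' := by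
              rw [show k + u.toList.length + 2 = k + (u.toList.length + 2) from by omega, hget,
                List.getD_eq_getElem?_getD, e1, e2]
              rfl
            have e5 : (norm.getD (k + u.toList.length + 2) ' ' == ' ') = true := by
              rw [hgd]
              rfl
            rw [e5, Bool.or_true]
            exact (decide_eq_true h1).symm
        · have h2 : 2 ≤ v.toList.length := by
            have h0 : v.toList.length ≠ 0 := by
              intro h0; exact hv.1 (List.eq_nil_of_length_eq_zero h0)
            omega
          have hTge : 2 ≤ (PySem.Str.join " " (v :: rest)).toList.length := by
            rw [hT, List.length_append]
            omega
          have e1 : ((u.toList ++ [' ']) ++ (PySem.Str.join " " (v :: rest)).toList)[u.toList.length + 2]?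
              = (PySem.Str.join " " (v :: rest)).toList[1]? := by
            rw [List.getElem?_append_right (by simp)]
            congr 1
            simp only [List.length_append, List.length_cons, List.length_nil]
            omega
          have e2 : (PySem.Str.join " " (v :: rest)).toList[1]? = v.toList[1]? := by
            rw [hT, List.getElem?_append_left (by omega)]
          have hgd : norm.getD (k + u.toList.length + 2) ' ' = v.toList.getD 1 ' ' := by
            rw [show k + u.toList.length + 2 = k + (u.toList.length + 2) from by omega, hget,
              List.getD_eq_getElem?_getD, e1, e2, ← List.getD_eq_getElem?_getD]
          have hmem : v.toList.getD 1 ' ' ∈ v.toList := by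
            rw [List.getD_eq_getElem v.toList ' ' (by omega)]
            exact List.getElem_mem _
          have hne' : v.toList.getD 1 ' ' ≠ ' ' := hv.2 _ hmem
          have e3 : (k + u.toList.length + 2 == norm.length) = false := by
            simp only [beq_eq_false_iff_ne, ne_eq]
            omega
          have e4 : (norm.getD (k + u.toList.length + 2) ' ' == ' ') = false := by
            rw [hgd]
            exact beq_eq_false_iff_ne.mpr hne'
          rw [e3, e4, Bool.false_or]
          exact (decide_eq_false h1).symm
      -- recurse past the space
      have hdroptail : norm.drop (k + u.toList.length + 1) = (PySem.Str.join " " (v :: rest)).toList := by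
        have hdd : norm.drop (k + u.toList.length + 1) = (norm.drop k).drop (u.toList.length + 1) := by
          rw [List.drop_drop, Nat.add_assoc]
        rw [hdd, hdrop2, show u.toList.length + 1 = (u.toList ++ [' ']).length from by simp, List.drop_left]
      have hctx' : k + u.toList.length + 1 = 0 ∨ norm.getD (k + u.toList.length + 1 - 1) 'x' = ' ' := by
        refine Or.inr ?_
        have e1 : ((u.toList ++ [' ']) ++ (PySem.Str.join " " (v :: rest)).toList)[u.toList.length]?
            = some ' ' := by
          rw [List.getElem?_append_left (by simp), List.getElem?_append_right (by omega)]
          simp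
        rw [show k + u.toList.length + 1 - 1 = k + u.toList.length from by omega, hget,
          List.getD_eq_getElem?_getD, e1]
        rfl
      have hrec : pvScanB norm norm.length (k + u.toList.length + 1) (norm.drop (k + u.toList.length + 1)) = pvPair (v :: rest) :=
        ih norm (k + u.toList.length + 1) (by simp) (fun x hx => htok x (by simp [hx])) (by rw [hdroptail]) hctx'
      rw [hdroptail] at hrec
      -- assemble
      rw [hdrop', pvScanB_token u.toList norm norm.length k _ hu.2]
      rw [pvScanB]
      have hulen : PySem.Str.len u = 1 ↔ u.toList.length = 1 := by
        simp [PySem.Str.len]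
      have hvlen : PySem.Str.len v = 1 ↔ v.toList.length = 1 := by
        simp [PySem.Str.len]
      have hkeep : pvKeepB norm norm.length (k + u.toList.length) ' '
          = !(decide (u.toList.length = 1) && decide (v.toList.length = 1)) := by
        unfold pvKeepB
        rw [hl, hr]
        simp only [show ((' ' : Char) == ' ') = true from rfl, Bool.true_and]
      by_cases hb : u.toList.length = 1 ∧ v.toList.length = 1
      · have hkf : pvKeepB norm norm.length (k + u.toList.length) ' ' = false := by
          rw [hkeep]; simp [hb.1, hb.2]
        rw [hkf]
        simp only [Bool.false_eq_true, if_false]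
        rw [hrec]
        have hsep : PySem.Str.len u = 1 ∧ PySem.Str.len v = 1 := ⟨hulen.mpr hb.1, hvlen.mpr hb.2⟩
        simp only [pvPair, pvPairGo]
        rw [if_pos hsep]
        simp
      · have hkt : pvKeepB norm norm.length (k + u.toList.length) ' ' = true := by
          rw [hkeep]
          by_cases h : u.toList.length = 1
          · have h2 : ¬ v.toList.length = 1 := fun hc => hb ⟨h, hc⟩
            rw [decide_eq_true h, decide_eq_false h2]
            rfl
          · rw [decide_eq_false h]
            rfl
        rw [hkt]
        simp only [if_true]
        rw [hrec]
        have hsep : ¬ (PySem.Str.len u = 1 ∧ PySem.Str.len v = 1) := by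
          intro hcon; exact hb ⟨hulen.mp hcon.1, hvlen.mp hcon.2⟩
        simp only [pvPair, pvPairGo]
        rw [if_neg hsep]
        simp

-- ----- tokens of split() are nonempty and whitespace-free -----

theorem pvSplitGo_tokens : ∀ (s cur : List Char) (acc : List (List Char)),
    (∀ u ∈ acc, u ≠ [] ∧ ∀ c ∈ u, PySem.Chars.isspace c = false) →
    (∀ c ∈ cur, PySem.Chars.isspace c = false) →
    ∀ t ∈ PySem.Chars.split₀.go s cur acc, t ≠ [] ∧ ∀ c ∈ t, PySem.Chars.isspace c = false := by
  intro s
  induction s with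
  | nil =>
    intro cur acc hacc hcur t ht
    rw [PySem.Chars.split₀.go] at ht
    by_cases hc : cur.isEmpty
    · rw [if_pos hc] at ht
      exact hacc t (List.mem_reverse.mp ht)
    · rw [if_neg hc] at ht
      rcases List.mem_cons.mp (List.mem_reverse.mp ht) with h | h
      · subst h
        constructor
        · simpa using fun hnil => hc (by simp [hnil])
        · intro d hd
          exact hcur d (List.mem_reverse.mp hd)
      · exact hacc t h
  | cons c rest ih =>
    intro cur acc hacc hcur t ht
    rw [PySem.Chars.split₀.go] at ht
    by_cases hs : PySem.Chars.isspace c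
    · rw [if_pos hs] at ht
      by_cases hc : cur.isEmpty
      · rw [if_pos hc] at ht
        exact ih [] acc hacc (by simp) t ht
      · rw [if_neg hc] at ht
        refine ih [] (cur.reverse :: acc) ?_ (by simp) t ht
        intro u hu
        rcases List.mem_cons.mp hu with hu | hu
        · subst hu
          constructor
          · simpa using fun hnil => hc (by simp [hnil])
          · intro d hd
            exact hcur d (List.mem_reverse.mp hd)
        · exact hacc u hu
    · rw [if_neg hs] at ht
      refine ih (c :: cur) acc hacc ?_ t ht
      intro d hd
      rcases List.mem_cons.mp hd with hd | hd
      · subst hd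
        exact Bool.not_eq_true _ ▸ (Bool.of_not_eq_true hs)
      · exact hcur d hd

theorem pvSplit_tokens (text : String) :
    ∀ u ∈ PySem.Str.split₀ text, u.toList ≠ [] ∧ ∀ c ∈ u.toList, c ≠ ' ' := by
  intro u hu
  simp only [PySem.Str.split₀, List.mem_map] at hu
  obtain ⟨t, ht, rfl⟩ := hu
  have h := pvSplitGo_tokens text.toList [] [] (by simp) (by simp) t ht
  rw [String.toList_ofList]
  refine ⟨h.1, fun c hc hsp => ?_⟩
  have := h.2 c hc
  rw [hsp] at this
  simp [PySem.Chars.isspace] at this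

-- ===== VERDICT (by name: the statement is the Claim_ definition above) =====
theorem collapse_spaced_text_py_spec : Claim_equal_collapse_spaced_text_py := by
  intro text _
  unfold Spec_collapse_spaced_text_py collapse_spaced_text_py collapse_spaced_text_py_alt
  by_cases h : PySem.Str.split₀ text = []
  · simp [h]
  · simp only [h, if_false]
    have htok := pvSplit_tokens text
    set ts := PySem.Str.split₀ text with hts
    have hA : pvOuterA ts 0 [] ts.length = pvGroupsB ts ts.length := by
      rw [pvOuterA_eq ts ts.length 0 [] (by omega)]
      simp
    have h2 : (PySem.Str.join " " (pvGroupsB ts ts.length)).toList = pvPair ts :=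
      pvGroups_pair ts.length ts (le_refl _) h
    have h3 : pvScanB (PySem.Str.join " " ts).toList (PySem.Str.join " " ts).toList.length 0 (PySem.Str.join " " ts).toList = pvPair ts := by
      have := pvScan_pair ts (PySem.Str.join " " ts).toList 0 h htok (by simp) (Or.inl rfl)
      simpa using this
    refine String.toList_inj.mp ?_
    rw [hA, h2, String.toList_ofList, h3]
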